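-- pv_equiv track=rewrite | github.com/Darkhunter9/python | Broken Window_2.py | broken_window
-- ===== SOURCE A (Python) =====
-- def sliced(piece):
--     return sum(([x, y] for x, y in zip(piece, piece[1:])), [])
--
-- def is_incorrect(up, down):
--     return len({x+y for x, y in zip(up, down)}) > 1
--
-- def broken_window(pieces):
--     stack = [([], [], [], [], list(enumerate(pieces)))]
--     while stack:
--         up, down, up_idx, down_idx, pieces = stack.pop()
--         if is_incorrect(up, down):
--             continue
--         if not pieces and len(up) == len(down):
--             return up_idx, down_idx
--         for k in range(len(pieces)):
--             (index, piece), _pieces = pieces[k], pieces[:k]+pieces[k+1:]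
--             if len(up) < len(down):
--                 piece = sliced(piece[::-1])
--                 stack += [(up+piece, down, up_idx+[index], down_idx, _pieces)]
--             else:
--                 piece = sliced(piece)
--                 stack += [(up, down+piece, up_idx, down_idx+[index], _pieces)]
-- ===== SOURCE B (Python) =====
-- def broken_window(pieces):
--     def rec(up, down, up_idx, down_idx, pieces):
--         if len({x + y for x, y in zip(up, down)}) > 1:
--             return None
--         if not pieces and len(up) == len(down):
--             return up_idx, down_idx
--         for k in reversed(range(len(pieces))):
--             index, piece = pieces[k]
--             rest = pieces[:k] + pieces[k+1:]
--             if len(up) < len(down):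
--                 p = [v for pair in zip(piece[::-1], piece[::-1][1:]) for v in pair]
--                 r = rec(up + p, down, up_idx + [index], down_idx, rest)
--             else:
--                 p = [v for pair in zip(piece, piece[1:]) for v in pair]
--                 r = rec(up, down + p, up_idx, down_idx + [index], rest)
--             if r is not None:
--                 return r
--         return None
--     return rec([], [], [], [], list(enumerate(pieces)))
-- ===== Notes on version B (the rewrite author's own statement) =====
-- stated objective: alternative
-- what changed: The explicit-stack while-loop DFS is replaced by a recursive backtracker that returns the first non-None result of its children (iterated in reversed index order to match the stack's LIFO pop order).
import Mathlib
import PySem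

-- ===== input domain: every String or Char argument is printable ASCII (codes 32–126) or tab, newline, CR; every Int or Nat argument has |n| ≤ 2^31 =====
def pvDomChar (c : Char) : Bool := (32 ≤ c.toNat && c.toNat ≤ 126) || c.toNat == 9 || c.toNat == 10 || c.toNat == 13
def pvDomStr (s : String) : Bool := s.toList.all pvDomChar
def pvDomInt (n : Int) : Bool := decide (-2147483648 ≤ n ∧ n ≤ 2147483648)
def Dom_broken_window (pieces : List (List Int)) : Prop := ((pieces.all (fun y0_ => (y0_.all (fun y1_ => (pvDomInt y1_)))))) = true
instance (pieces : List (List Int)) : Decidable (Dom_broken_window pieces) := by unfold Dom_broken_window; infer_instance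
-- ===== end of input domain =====

-- B replaces A's explicit-stack iterative DFS by a recursive backtracker returning the
-- first non-None child result (children in reversed index order = the stack's pop order);
-- same asymptotic cost ("alternative").

-- ===== PORT A =====
-- sum(([x, y] for x, y in zip(piece, piece[1:])), []) : left-to-right concatenation
def slicedA (piece : List Int) : List Int :=
  (piece.zip (piece.drop 1)).foldl (fun acc p => acc ++ [p.1, p.2]) []

def is_incorrectA (up down : List Int) : Bool :=
  decide (((PySem.Set.ofList ((up.zip down).map (fun p => p.1 + p.2))).length : Int) > 1)

-- the state pushed for index k of the for-loop (pieces[k] is always in range, so the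
-- pyGet? default is never used; ps[:k]+ps[k+1:] = take k ++ drop (k+1) for 0 ≤ k < len)
def childA (up down up_idx down_idx : List Int) (ps : List (Int × List Int)) (k : Nat) :
    List Int × List Int × List Int × List Int × List (Int × List Int) :=
  let ip := (PySem.List.pyGet? ps (k : Int)).getD (0, [])
  let rest := ps.take k ++ ps.drop (k + 1)
  if up.length < down.length then
    (up ++ slicedA ip.2.reverse, down, up_idx ++ [ip.1], down_idx, rest)
  else
    (up, down ++ slicedA ip.2, up_idx, down_idx ++ [ip.1], rest)

-- weight used only for termination of the while-loop
def pvWt (s : List Int × List Int × List Int × List Int × List (Int × List Int)) : Nat :=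
  Nat.factorial (s.2.2.2.2.length + 1)

-- termination lemmas for the while-loop (cited by name in decreasing_by)
theorem pvMeasure_tail (s : List Int × List Int × List Int × List Int × List (Int × List Int))
    (rest : List (List Int × List Int × List Int × List Int × List (Int × List Int))) :
    ((rest.map pvWt).sum) < (((s :: rest).map pvWt).sum) := by
  simp only [List.map_cons, List.sum_cons]
  exact Nat.lt_add_of_pos_left (Nat.factorial_pos _)

theorem pvMeasure_expand (up down up_idx down_idx : List Int) (ps : List (Int × List Int))
    (rest : List (List Int × List Int × List Int × List Int × List (Int × List Int))) :
    (((((List.range ps.length).map (childA up down up_idx down_idx ps)).reverse ++ rest).map pvWt).sum)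
      < ((((up, down, up_idx, down_idx, ps) :: rest).map pvWt).sum) := by
  rw [List.map_append, List.sum_append, List.map_cons, List.sum_cons,
    List.map_reverse, List.sum_reverse, List.map_map]
  refine Nat.add_lt_add_right ?_ ((rest.map pvWt).sum)
  have h : ∀ x ∈ (List.range ps.length).map (pvWt ∘ childA up down up_idx down_idx ps),
      x = Nat.factorial ps.length := by
    intro x hx
    obtain ⟨j, hj, rfl⟩ := List.mem_map.mp hx
    have hk : j + 1 ≤ ps.length := List.mem_range.mp hj
    have hlen : ∀ s : List Int × List Int × List Int × List Int × List (Int × List Int),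
        s.2.2.2.2 = ps.take j ++ ps.drop (j + 1) → pvWt s = Nat.factorial ps.length := by
      intro s hs
      rw [pvWt, hs, List.length_append, List.length_take, List.length_drop,
        Nat.min_eq_left (Nat.le_of_succ_le hk), Nat.add_right_comm, Nat.add_comm,
        Nat.sub_add_cancel hk]
    rw [Function.comp_apply, childA]
    split <;> exact hlen _ rfl
  rw [List.sum_eq_card_nsmul _ _ h, List.length_map, List.length_range, smul_eq_mul,
    pvWt, Nat.factorial_succ]
  exact Nat.mul_lt_mul_of_lt_of_le (Nat.lt_succ_self _) (Nat.le_refl _) (Nat.factorial_pos _)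

-- the while-loop; the Python stack's top (its last element) is the HEAD here, so
-- 'stack += [children k=0..n-1]' becomes prepending the reversed children list.
def bwLoop (stack : List (List Int × List Int × List Int × List Int × List (Int × List Int))) :
    Option (List Int × List Int) :=
  match stack with
  | [] => none
  | (up, down, up_idx, down_idx, ps) :: rest =>
    if is_incorrectA up down then bwLoop rest
    else if ps.isEmpty && up.length == down.length then some (up_idx, down_idx)
    else bwLoop (((List.range ps.length).map (childA up down up_idx down_idx ps)).reverse ++ rest)
termination_by (stack.map pvWt).sum
decreasing_by
  · exact pvMeasure_tail _ _
  · exact pvMeasure_expand up down up_idx down_idx ps rest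

def broken_window (pieces : List (List Int)) : Option (List Int × List Int) :=
  bwLoop [([], [], [], [], PySem.List.enumerate pieces)]

-- ===== PORT B =====
-- [v for pair in zip(piece, piece[1:]) for v in pair]
def slicedB (piece : List Int) : List Int :=
  (piece.zip (piece.drop 1)).flatMap (fun p => [p.1, p.2])

-- termination lemma for the recursive backtracker (cited by name in decreasing_by)
theorem pvRest_lt {a : Type} (ps : List a) (k : {x // x ∈ (List.range ps.length).reverse}) :
    (ps.take k.1 ++ ps.drop (k.1 + 1)).length < ps.length := by
  have hk : k.1 + 1 ≤ ps.length := List.mem_range.mp (List.mem_reverse.mp k.2)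
  rw [List.length_append, List.length_take, List.length_drop,
    Nat.min_eq_left (Nat.le_of_succ_le hk)]
  refine Nat.lt_of_succ_le (Nat.le_of_eq ?_)
  rw [Nat.succ_eq_add_one, Nat.add_right_comm, Nat.add_comm, Nat.sub_add_cancel hk]

def bwRec (up down up_idx down_idx : List Int) (ps : List (Int × List Int)) :
    Option (List Int × List Int) :=
  if decide (((PySem.Set.ofList ((up.zip down).map (fun p => p.1 + p.2))).length : Int) > 1) then
    none
  else if ps.isEmpty && up.length == down.length then some (up_idx, down_idx)
  else
    ((List.range ps.length).reverse.attach.findSome? (fun k =>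
      let ip := (PySem.List.pyGet? ps (k.1 : Int)).getD (0, [])
      let rest := ps.take k.1 ++ ps.drop (k.1 + 1)
      if up.length < down.length then
        bwRec (up ++ slicedB ip.2.reverse) down (up_idx ++ [ip.1]) down_idx rest
      else
        bwRec up (down ++ slicedB ip.2) up_idx (down_idx ++ [ip.1]) rest))
termination_by ps.length
decreasing_by
  all_goals exact pvRest_lt ps k

def broken_window_alt (pieces : List (List Int)) : Option (List Int × List Int) :=
  bwRec [] [] [] [] (PySem.List.enumerate pieces)

-- ===== PRECONDITION & SPEC =====
def Spec_broken_window (pieces : List (List Int)) (out : Option (List Int × List Int)) : Prop := out = broken_window_alt pieces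
instance (pieces : List (List Int)) (out : Option (List Int × List Int)) : Decidable (Spec_broken_window pieces out) := by unfold Spec_broken_window; infer_instance

-- ===== CLAIM (what is proved, stated in full; the proofs are below) =====
def Claim_equal_broken_window : Prop := ∀ (pieces : List (List Int)), Dom_broken_window pieces → Spec_broken_window pieces (broken_window pieces)

-- ===== LEMMAS AND PROOFS =====

def bwRecS (s : List Int × List Int × List Int × List Int × List (Int × List Int)) :
    Option (List Int × List Int) :=
  bwRec s.1 s.2.1 s.2.2.1 s.2.2.2.1 s.2.2.2.2

theorem sliced_eq (l : List Int) : slicedA l = slicedB l := by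
  simp [slicedA, slicedB, List.flatMap_def]

theorem findSome?_attach {α β : Type} (l : List α) (f : α → Option β) :
    l.attach.findSome? (fun x => f x.1) = l.findSome? f := by
  conv_rhs => rw [← List.attach_map_subtype_val l]
  rw [List.findSome?_map]
  rfl

theorem bwRec_bad (up down up_idx down_idx : List Int) (ps : List (Int × List Int))
    (h : is_incorrectA up down = true) :
    bwRec up down up_idx down_idx ps = none := by
  unfold is_incorrectA at h
  rw [bwRec, if_pos h]

theorem bwRec_done (up down up_idx down_idx : List Int) (ps : List (Int × List Int))
    (h1 : is_incorrectA up down = false) (h2 : (ps.isEmpty && up.length == down.length) = true) :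
    bwRec up down up_idx down_idx ps = some (up_idx, down_idx) := by
  unfold is_incorrectA at h1
  rw [bwRec, if_neg (by rw [h1]; simp), if_pos h2]

-- B's recursive call on A's pushed state is B's loop body
theorem bwRecS_childA (up down up_idx down_idx : List Int)
    (ps : List (Int × List Int)) (k : Nat) :
    bwRecS (childA up down up_idx down_idx ps k) =
      (let ip := (PySem.List.pyGet? ps (k : Int)).getD (0, [])
       let rest := ps.take k ++ ps.drop (k + 1)
       if up.length < down.length then
         bwRec (up ++ slicedB ip.2.reverse) down (up_idx ++ [ip.1]) down_idx rest
       else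
         bwRec up (down ++ slicedB ip.2) up_idx (down_idx ++ [ip.1]) rest) := by
  simp only [bwRecS, childA, sliced_eq]
  split <;> rfl

theorem bwRec_step (up down up_idx down_idx : List Int) (ps : List (Int × List Int))
    (h1 : is_incorrectA up down = false) (h2 : (ps.isEmpty && up.length == down.length) = false) :
    bwRec up down up_idx down_idx ps =
      ((List.range ps.length).reverse.map (childA up down up_idx down_idx ps)).findSome? bwRecS := by
  unfold is_incorrectA at h1
  rw [bwRec, if_neg (by rw [h1]; simp), if_neg (by rw [h2]; simp)]
  rw [List.findSome?_map]
  rw [← findSome?_attach ((List.range ps.length).reverse)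
    (fun k => (bwRecS ∘ childA up down up_idx down_idx ps) k)]
  congr 1
  funext x
  exact (bwRecS_childA up down up_idx down_idx ps x.1).symm

theorem bwLoop_eq_findSome (stack :
    List (List Int × List Int × List Int × List Int × List (Int × List Int))) :
    bwLoop stack = stack.findSome? bwRecS := by
  induction stack using bwLoop.induct with
  | case1 => simp [bwLoop]
  | case2 up down up_idx down_idx ps rest hbad ih =>
    rw [bwLoop, if_pos hbad, ih, List.findSome?_cons]
    simp [bwRecS, bwRec_bad up down up_idx down_idx ps hbad]
  | case3 up down up_idx down_idx ps rest hbad hdone =>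
    have hb : is_incorrectA up down = false := by simpa using hbad
    rw [bwLoop, if_neg hbad, if_pos hdone, List.findSome?_cons]
    simp [bwRecS, bwRec_done up down up_idx down_idx ps hb hdone]
  | case4 up down up_idx down_idx ps rest hbad hdone ih =>
    have hb : is_incorrectA up down = false := by simpa using hbad
    have hd : (ps.isEmpty && up.length == down.length) = false := by simpa using hdone
    rw [bwLoop, if_neg hbad, if_neg hdone, ih, List.findSome?_append, List.findSome?_cons]
    have hrev : ((List.range ps.length).map (childA up down up_idx down_idx ps)).reverse
        = (List.range ps.length).reverse.map (childA up down up_idx down_idx ps) := by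
      rw [List.map_reverse]
    rw [hrev]
    have hstep := bwRec_step up down up_idx down_idx ps hb hd
    have : bwRecS (up, down, up_idx, down_idx, ps) = bwRec up down up_idx down_idx ps := rfl
    rw [this, hstep]
    cases ((List.range ps.length).reverse.map (childA up down up_idx down_idx ps)).findSome? bwRecS <;>
      simp [Option.or]

-- ===== VERDICT (by name: the statement is the Claim_ definition above) =====
theorem broken_window_spec : Claim_equal_broken_window := by
  intro pieces _
  unfold Spec_broken_window broken_window broken_window_alt
  rw [bwLoop_eq_findSome, List.findSome?_cons]
  have : bwRecS ([], [], [], [], PySem.List.enumerate pieces)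
      = bwRec [] [] [] [] (PySem.List.enumerate pieces) := rfl
  rw [this]
  cases bwRec [] [] [] [] (PySem.List.enumerate pieces) <;> rfl
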